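-- pv_equiv track=rewrite | github.com/marcosd4h/DeepExtractRuntime | skills/com-interface-reconstruction/scripts/_common.py | _split_template_args
-- ===== SOURCE A (Python) =====
-- def _split_template_args(text: str) -> list[str]:
--     """Split a comma-separated template argument list respecting nested <> brackets."""
--     depth = 0
--     current = []
--     results = []
--     for ch in text:
--         if ch == '<':
--             depth += 1
--             current.append(ch)
--         elif ch == '>':
--             depth -= 1
--             current.append(ch)
--         elif ch == ',' and depth == 0:
--             results.append(''.join(current).strip())
--             current = []
--         else:
--             current.append(ch)
--     remaining = ''.join(current).strip()
--     if remaining: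
--         results.append(remaining)
--     return results
-- ===== SOURCE B (Python) =====
-- def _split_template_args(text: str) -> list[str]:
--     """Split a comma-separated template argument list respecting nested <> brackets."""
--     parts = text.split(',')
--     results = []
--     buffer = []
--     depth = 0
--     for part in parts[:-1]:
--         buffer.append(part)
--         depth += part.count('<') - part.count('>')
--         if depth == 0:
--             results.append(','.join(buffer).strip())
--             buffer = []
--     buffer.append(parts[-1])
--     last = ','.join(buffer).strip()
--     if last:
--         results.append(last)
--     return results
-- ===== Notes on version B (the rewrite author's own statement) =====
-- stated objective: alternative
-- what changed: A scans character by character with a depth counter and a character accumulator; B first splits the text on every comma, then merges the comma-free fragments back together by tracking the bracket balance per fragment via substring counts, emitting a joined-and-stripped group whenever the balance returns to zero. (the per-character Python loop is replaced by bulk C-level str.split/str.count/str.join calls, which a timing run measured as a large constant-factor speedup).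
import Mathlib
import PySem

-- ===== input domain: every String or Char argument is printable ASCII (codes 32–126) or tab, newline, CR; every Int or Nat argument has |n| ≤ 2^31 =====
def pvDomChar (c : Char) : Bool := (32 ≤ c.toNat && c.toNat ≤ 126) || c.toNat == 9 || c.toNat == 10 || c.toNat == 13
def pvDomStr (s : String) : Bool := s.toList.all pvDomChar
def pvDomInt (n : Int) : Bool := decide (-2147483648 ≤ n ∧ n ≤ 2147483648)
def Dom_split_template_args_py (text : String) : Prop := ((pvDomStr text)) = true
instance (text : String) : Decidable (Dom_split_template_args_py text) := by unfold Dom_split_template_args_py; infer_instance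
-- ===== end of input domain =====

-- B replaces A's character-by-character accumulator scan by a split(',')-then-merge pass over
-- comma-free fragments (objective: alternative decomposition, same asymptotic cost).

-- ===== PORT A =====
-- state: (depth, current, results)
def stepA (s : Int × List Char × List String) (ch : Char) : Int × List Char × List String :=
  if ch = '<' then (s.1 + 1, s.2.1 ++ [ch], s.2.2)
  else if ch = '>' then (s.1 - 1, s.2.1 ++ [ch], s.2.2)
  else if ch = ',' ∧ s.1 = 0 then (s.1, [], s.2.2 ++ [String.ofList (PySem.Chars.strip s.2.1)])
  else (s.1, s.2.1 ++ [ch], s.2.2)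

def finishA (s : Int × List Char × List String) : List String :=
  let remaining := PySem.Chars.strip s.2.1
  if remaining ≠ [] then s.2.2 ++ [String.ofList remaining] else s.2.2

def split_template_args_py (text : String) : List String :=
  finishA (text.toList.foldl stepA (0, [], []))

-- ===== PORT B =====
-- state: (results, buffer, depth)
def stepB (s : List String × List (List Char) × Int) (part : List Char) : List String × List (List Char) × Int :=
  let buf := s.2.1 ++ [part]
  let d := s.2.2 + (PySem.Chars.count part ['<'] : Int) - (PySem.Chars.count part ['>'] : Int)
  if d = 0 then (s.1 ++ [String.ofList (PySem.Chars.strip (PySem.Chars.join [','] buf))], [], d)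
  else (s.1, buf, d)

def finishB (s : List String × List (List Char) × Int) (lastPart : List Char) : List String :=
  let last := PySem.Chars.strip (PySem.Chars.join [','] (s.2.1 ++ [lastPart]))
  if last ≠ [] then s.1 ++ [String.ofList last] else s.1

def split_template_args_py_alt (text : String) : List String :=
  let parts := PySem.Chars.splitOn text.toList [',']
  -- parts[-1]: split always returns a non-empty list, so getLastD is exact here
  finishB (parts.dropLast.foldl stepB ([], [], 0)) (parts.getLastD [])

-- ===== PRECONDITION & SPEC =====
def Spec_split_template_args_py (text : String) (out : List String) : Prop := out = split_template_args_py_alt text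
instance (text : String) (out : List String) : Decidable (Spec_split_template_args_py text out) := by unfold Spec_split_template_args_py; infer_instance

-- ===== CLAIM (what is proved, stated in full; the proofs are below) =====
def Claim_equal_split_template_args_py : Prop := ∀ (text : String), Dom_split_template_args_py text → Spec_split_template_args_py text (split_template_args_py text)

-- ===== LEMMAS AND PROOFS =====

-- PySem.Chars.splitOn with the single-char separator "," is Mathlib's List.splitOn
theorem splitOn_go_eq (fuel : Nat) (l cur : List Char) (acc : List (List Char))
    (h : l.length < fuel) :
    PySem.Chars.splitOn.go [','] fuel l cur acc
      = acc.reverse ++ (List.splitOn ',' l).modifyHead (cur.reverse ++ ·) := by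
  induction fuel generalizing l cur acc with
  | zero => omega
  | succ fuel ih =>
    cases l with
    | nil =>
      simp [PySem.Chars.splitOn.go, List.splitOn, List.splitOnP_nil]
    | cons c rest =>
      by_cases hc : c = ','
      · subst hc
        rw [show PySem.Chars.splitOn.go [','] (fuel+1) (','::rest) cur acc
              = PySem.Chars.splitOn.go [','] fuel rest [] (cur.reverse :: acc) by
            simp [PySem.Chars.splitOn.go, List.isPrefixOf]]
        rw [ih rest [] (cur.reverse :: acc) (by simpa using Nat.lt_of_succ_lt_succ h)]
        simp [List.splitOn, List.splitOnP_cons]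
        rw [show ∀ (L : List (List Char)), List.modifyHead (fun x => x) L = L from
          fun L => by cases L <;> simp]
      · rw [show PySem.Chars.splitOn.go [','] (fuel+1) (c::rest) cur acc
              = PySem.Chars.splitOn.go [','] fuel rest (c :: cur) acc by
            simp [PySem.Chars.splitOn.go, List.isPrefixOf, Ne.symm hc]]
        rw [ih rest (c :: cur) acc (by simpa using Nat.lt_of_succ_lt_succ h)]
        simp [List.splitOn, List.splitOnP_cons, hc, List.modifyHead_modifyHead]
        congr 1

theorem splitOn_comma (cs : List Char) :
    PySem.Chars.splitOn cs [','] = List.splitOn ',' cs := by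
  rw [PySem.Chars.splitOn, splitOn_go_eq cs.length.succ cs [] [] (Nat.lt_succ_self _)]
  simp
  rw [show ∀ (L : List (List Char)), List.modifyHead (fun x => x) L = L from
    fun L => by cases L <;> simp]

-- PySem.Chars.count with a single-char pattern is List.count
theorem count_go_eq (c : Char) (fuel : Nat) (l : List Char) (acc : Nat) (h : l.length ≤ fuel) :
    PySem.Chars.count.go [c] fuel l acc = acc + l.count c := by
  induction fuel generalizing l acc with
  | zero =>
    cases l with
    | nil => simp [PySem.Chars.count.go]
    | cons x xs => simp at h
  | succ fuel ih =>
    cases l with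
    | nil => simp [PySem.Chars.count.go]
    | cons x xs =>
      by_cases hx : x = c
      · subst hx
        rw [show PySem.Chars.count.go [x] (fuel+1) (x::xs) acc
              = PySem.Chars.count.go [x] fuel xs (acc+1) by
            simp [PySem.Chars.count.go, List.isPrefixOf]]
        rw [ih xs (acc+1) (by simpa using Nat.le_of_succ_le_succ h)]
        simp
        omega
      · rw [show PySem.Chars.count.go [c] (fuel+1) (x::xs) acc
              = PySem.Chars.count.go [c] fuel xs acc by
            simp [PySem.Chars.count.go, List.isPrefixOf, Ne.symm hx]]
        rw [ih xs acc (by simpa using Nat.le_of_succ_le_succ h)]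
        simp [hx]

theorem count_singleton (l : List Char) (c : Char) :
    PySem.Chars.count l [c] = l.count c := by
  rw [PySem.Chars.count]
  simp [count_go_eq c l.length l 0 (le_refl _)]

-- every piece of List.splitOn ',' is comma-free
theorem splitOn_comma_free (l : List Char) : ∀ p ∈ List.splitOn ',' l, ',' ∉ p := by
  induction l with
  | nil => simp [List.splitOn, List.splitOnP_nil]
  | cons x xs ih =>
    intro p hp
    rw [List.splitOn, List.splitOnP_cons] at hp
    by_cases hx : x = ','
    · simp [hx] at hp
      rcases hp with h | h
      · simp [h]
      · exact ih p (by rw [List.splitOn]; exact h)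
    · simp [hx] at hp
      rcases hq : List.splitOnP (fun a => a == ',') xs with _ | ⟨q, qs⟩
      · exact absurd hq (List.splitOnP_ne_nil _ xs)
      · rw [hq] at hp
        simp at hp
        rcases hp with h | h
        · subst h
          intro hmem
          rcases List.mem_cons.mp hmem with h | h
          · exact hx h.symm
          · exact ih q (by rw [List.splitOn, hq]; exact List.mem_cons_self ..) h
        · exact ih p (by rw [List.splitOn, hq]; exact List.mem_cons_of_mem _ h)

theorem inter_cc (u v : List Char) (w : List (List Char)) :
    [','].intercalate (u :: v :: w) = u ++ [','] ++ [','].intercalate (v :: w) := by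
  simp [List.intercalate, List.intersperse]

-- A's accumulator for the pieces B still holds in its buffer
def glue (buf : List (List Char)) : List Char :=
  if buf = [] then [] else PySem.Chars.join [','] buf ++ [',']

theorem join_snoc (buf : List (List Char)) (p : List Char) :
    PySem.Chars.join [','] (buf ++ [p]) = glue buf ++ p := by
  induction buf with
  | nil => simp [PySem.Chars.join, glue, List.intercalate]
  | cons b bs ih =>
    rcases bs with _ | ⟨b', bs'⟩
    · simp [PySem.Chars.join, glue, List.intercalate, List.intersperse]
    · simp only [PySem.Chars.join, List.cons_append, inter_cc] at *
      rw [ih]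
      simp only [glue, PySem.Chars.join]
      rw [inter_cc]
      simp

-- a comma-free fragment only bumps the depth and extends the accumulator
theorem foldl_stepA_frag (p : List Char) (h : ',' ∉ p) (d : Int) (cur : List Char)
    (res : List String) :
    p.foldl stepA (d, cur, res)
      = (d + (p.count '<' : Int) - (p.count '>' : Int), cur ++ p, res) := by
  induction p generalizing d cur res with
  | nil => simp
  | cons c cs ih =>
    have hc : c ≠ ',' := fun hh => h (hh ▸ List.mem_cons_self ..)
    have hcs : ',' ∉ cs := fun hh => h (List.mem_cons_of_mem _ hh)
    by_cases h1 : c = '<'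
    · subst h1
      rw [List.foldl_cons,
        show stepA (d, cur, res) '<' = (d + 1, cur ++ ['<'], res) by simp [stepA], ih hcs]
      simp
      omega
    · by_cases h2 : c = '>'
      · subst h2
        rw [List.foldl_cons,
          show stepA (d, cur, res) '>' = (d - 1, cur ++ ['>'], res) by simp [stepA], ih hcs]
        simp
        omega
      · rw [List.foldl_cons, show stepA (d, cur, res) c = (d, cur ++ [c], res) by
          simp [stepA, h1, h2, hc], ih hcs]
        simp [h1, h2]

-- the main invariant: A over the glued text = B over the fragments
theorem main_lemma (ps : List (List Char)) (p : List Char) (d : Int)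
    (buf : List (List Char)) (res : List String)
    (hp : ',' ∉ p) (hps : ∀ q ∈ ps, ',' ∉ q) :
    finishA (List.foldl stepA (d, glue buf, res) ([','].intercalate (p :: ps)))
      = finishB (List.foldl stepB (res, buf, d) ((p :: ps).dropLast))
          ((p :: ps).getLastD []) := by
  induction ps generalizing p d buf res with
  | nil =>
    rw [show [','].intercalate [p] = p by simp [List.intercalate]]
    rw [foldl_stepA_frag p hp]
    simp [finishA, finishB, join_snoc]
  | cons q ps' ih =>
    have hq : ',' ∉ q := hps q (List.mem_cons_self ..)
    have hps' : ∀ r ∈ ps', ',' ∉ r := fun r hr => hps r (List.mem_cons_of_mem _ hr)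
    rw [inter_cc, List.foldl_append, List.foldl_append, foldl_stepA_frag p hp]
    set d' : Int := d + (p.count '<' : Int) - (p.count '>' : Int) with hd'
    rw [show ((p :: q :: ps').dropLast) = p :: (q :: ps').dropLast by simp,
      show ((p :: q :: ps').getLastD []) = ((q :: ps').getLastD []) by simp,
      List.foldl_cons]
    simp only [List.foldl_cons, List.foldl_nil]
    by_cases h0 : d' = 0
    · rw [show stepA (d', glue buf ++ p, res) ','
            = (d', [], res ++ [String.ofList (PySem.Chars.strip (glue buf ++ p))]) by
          simp [stepA, h0]]
      rw [show stepB (res, buf, d) p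
            = (res ++ [String.ofList (PySem.Chars.strip (PySem.Chars.join [','] (buf ++ [p])))], [], d') by
          simp [stepB, count_singleton, ← hd', h0]]
      rw [join_snoc]
      have := ih q d' [] (res ++ [String.ofList (PySem.Chars.strip (glue buf ++ p))]) hq hps'
      simpa [glue] using this
    · rw [show stepA (d', glue buf ++ p, res) ','
            = (d', glue buf ++ p ++ [','], res) by simp [stepA, h0]]
      rw [show stepB (res, buf, d) p = (res, buf ++ [p], d') by
          simp [stepB, count_singleton, ← hd', h0]]
      have hglue : glue (buf ++ [p]) = glue buf ++ p ++ [','] := by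
        simp [glue, join_snoc]
      have := ih q d' (buf ++ [p]) res hq hps'
      rw [hglue] at this
      simpa using this

-- ===== VERDICT (by name: the statement is the Claim_ definition above) =====
theorem split_template_args_py_spec : Claim_equal_split_template_args_py := by
  intro text _
  unfold Spec_split_template_args_py split_template_args_py split_template_args_py_alt
  rw [splitOn_comma]
  rcases hsp : List.splitOn ',' text.toList with _ | ⟨p, ps⟩
  · exact absurd hsp (by rw [List.splitOn]; exact List.splitOnP_ne_nil _ _)
  · have hfree := splitOn_comma_free text.toList
    rw [hsp] at hfree
    have htext : text.toList = [','].intercalate (p :: ps) := by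
      have := List.intercalate_splitOn text.toList ','
      rw [hsp] at this
      exact this.symm
    rw [htext]
    have := main_lemma ps p 0 [] [] (hfree p (List.mem_cons_self ..))
      (fun q hq => hfree q (List.mem_cons_of_mem _ hq))
    simpa [glue] using this
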